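-- pv_equiv track=rewrite | github.com/sayouzone/sayou-fabric | packages-dev/sayou-chunking-dev/src/sayou/dev/chunking/chunkers/content_aware_chunker.py | _do_chunk
-- ===== SOURCE A (Python) =====
-- from typing import List
--
-- def _do_chunk(text: str) -> List[str]:
--     chunks = []
--     current_chunk = []
--     for line in text.splitlines():
--         if line.startswith(('##', '###', 'Introduction', 'Conclusion')):
--             if current_chunk:
--                 chunks.append('\n'.join(current_chunk))
--             current_chunk = [line]
--         else:
--             current_chunk.append(line)
--
--     if current_chunk:
--         chunks.append('\n'.join(current_chunk))
--
--     return chunks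
-- ===== SOURCE B (Python) =====
-- from typing import List
--
-- def _do_chunk(text: str) -> List[str]:
--     lines = text.splitlines()
--     if not lines:
--         return []
--     # phase 1: collect cut points (indices of heading lines, always including 0)
--     bounds = [i for i, ln in enumerate(lines)
--               if ln.startswith(('##', '###', 'Introduction', 'Conclusion'))]
--     if not bounds or bounds[0] != 0:
--         bounds = [0] + bounds
--     bounds.append(len(lines))
--     # phase 2: slice between consecutive cut points
--     return ['\n'.join(lines[s:e]) for s, e in zip(bounds, bounds[1:])]
-- ===== Notes on version B (the rewrite author's own statement) =====
-- stated objective: alternative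
-- what changed: Replaces A's single-pass growing-buffer accumulator with a two-phase structure: first collect heading cut-point indices via enumerate, then slice the line list between consecutive cut points and join each slice.
import Mathlib
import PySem

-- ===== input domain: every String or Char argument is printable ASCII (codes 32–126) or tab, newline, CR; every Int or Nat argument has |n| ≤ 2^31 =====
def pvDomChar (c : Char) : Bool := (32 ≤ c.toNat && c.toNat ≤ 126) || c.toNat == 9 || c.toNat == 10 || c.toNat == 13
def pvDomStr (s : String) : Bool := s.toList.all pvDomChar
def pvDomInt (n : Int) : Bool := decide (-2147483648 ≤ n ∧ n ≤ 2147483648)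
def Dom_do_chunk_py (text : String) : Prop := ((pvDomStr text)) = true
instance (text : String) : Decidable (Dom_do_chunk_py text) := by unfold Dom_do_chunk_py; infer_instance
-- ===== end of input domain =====

-- B replaces A's growing-buffer accumulator with a two-phase collect-cut-points-then-slice structure (objective: alternative decomposition, no speed claim).

-- ===== PORT A =====
-- line.startswith(('##', '###', 'Introduction', 'Conclusion'))
def pvIsHead (line : String) : Bool :=
  PySem.Str.startswith line "##" || PySem.Str.startswith line "###" ||
  PySem.Str.startswith line "Introduction" || PySem.Str.startswith line "Conclusion"

def do_chunk_py (text : String) : List String :=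
  let st := (PySem.Str.splitlines text).foldl
    (fun (st : List String × List String) line =>
      if pvIsHead line then
        (if st.2 ≠ [] then st.1 ++ [PySem.Str.join "\n" st.2] else st.1, [line])
      else (st.1, st.2 ++ [line])) ([], [])
  if st.2 ≠ [] then st.1 ++ [PySem.Str.join "\n" st.2] else st.1

-- ===== PORT B =====
def do_chunk_py_alt (text : String) : List String :=
  let lines := PySem.Str.splitlines text
  if lines = [] then []
  else
    -- phase 1: cut points
    let heads := ((PySem.List.enumerate lines 0).filter (fun p => pvIsHead p.2)).map (·.1)
    let bounds := if heads = [] ∨ heads.head? ≠ some 0 then 0 :: heads else heads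
    let bounds := bounds ++ [(lines.length : Int)]
    -- phase 2: slices between consecutive cut points
    (bounds.zip bounds.tail).map
      (fun p => PySem.Str.join "\n" (PySem.List.slice lines (some p.1) (some p.2)))

-- ===== PRECONDITION & SPEC =====
def Spec_do_chunk_py (text : String) (out : List String) : Prop := out = do_chunk_py_alt text
instance (text : String) (out : List String) : Decidable (Spec_do_chunk_py text out) := by unfold Spec_do_chunk_py; infer_instance

-- ===== CLAIM (what is proved, stated in full; the proofs are below) =====
def Claim_equal_do_chunk_py : Prop := ∀ (text : String), Dom_do_chunk_py text → Spec_do_chunk_py text (do_chunk_py text)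

-- ===== LEMMAS AND PROOFS =====

-- common reference: group lines into chunks, accumulator style
def pvGrp (cur : List String) : List String → List String
  | [] => [PySem.Str.join "\n" cur]
  | l :: ls =>
      if pvIsHead l then PySem.Str.join "\n" cur :: pvGrp [l] ls
      else pvGrp (cur ++ [l]) ls

-- positions of heading lines
def pvHeads : List String → List Nat
  | [] => []
  | l :: ls => (if pvIsHead l then [0] else []) ++ (pvHeads ls).map (· + 1)

-- segments of `lines` between consecutive cut points (last one runs to the end)
def pvSegs (lines : List String) : List Nat → List String
  | [] => []
  | [s] => [PySem.Str.join "\n" (lines.drop s)]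
  | s :: e :: bs => PySem.Str.join "\n" ((lines.drop s).take (e - s)) :: pvSegs lines (e :: bs)

theorem pvHeads_lt (ls : List String) : ∀ k ∈ pvHeads ls, k < ls.length := by
  induction ls with
  | nil => simp [pvHeads]
  | cons l ls ih =>
      intro k hk
      simp [pvHeads] at hk
      rcases hk with ⟨h0, hk⟩ | ⟨j, hj, rfl⟩
      · simp [hk]
      · simpa using Nat.succ_lt_succ (ih j hj)

theorem pvDropShift (pre rest : List String) (s : Nat) :
    (pre ++ rest).drop (s + pre.length) = rest.drop s := by
  simp [List.drop_append]

theorem pvSegs_shift (pre rest : List String) :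
    ∀ bs, pvSegs (pre ++ rest) (bs.map (· + pre.length)) = pvSegs rest bs
  | [] => rfl
  | [s] => by simp only [List.map_cons, List.map_nil, pvSegs, pvDropShift]
  | s :: e :: bs => by
      have ih := pvSegs_shift pre rest (e :: bs)
      simp only [List.map_cons] at ih ⊢
      simp only [pvSegs, pvDropShift, ih]
      have he : e + pre.length - (s + pre.length) = e - s := by omega
      rw [he]

theorem pvGrp_eq_pvSegs (ls : List String) :
    ∀ cur, cur ≠ [] →
      pvGrp cur ls = pvSegs (cur ++ ls) (0 :: (pvHeads ls).map (· + cur.length)) := by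
  induction ls with
  | nil => intro cur _; simp [pvGrp, pvHeads, pvSegs]
  | cons l ls ih =>
      intro cur hcur
      by_cases hl : pvIsHead l
      · have h1 : pvGrp cur (l :: ls) = PySem.Str.join "\n" cur :: pvGrp [l] ls := by
          simp [pvGrp, hl]
        have hshift := pvSegs_shift cur (l :: ls) (0 :: (pvHeads ls).map (· + 1))
        rw [h1, ih [l] (by simp)]
        simp only [pvHeads, hl, if_pos, List.singleton_append, List.map_cons, List.map_map,
          pvSegs, Nat.zero_add, Nat.sub_zero, List.drop_zero, List.length_singleton] at hshift ⊢
        congr 1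
        · simp
        · exact hshift.symm
      · have h1 : pvGrp cur (l :: ls) = pvGrp (cur ++ [l]) ls := by simp [pvGrp, hl]
        rw [h1, ih (cur ++ [l]) (by simp)]
        simp only [pvHeads, hl, Bool.false_eq_true, if_neg, not_false_iff, List.nil_append,
          List.append_assoc, List.singleton_append, List.map_map, List.length_append,
          List.length_cons, List.length_nil]
        congr 1
        congr 1
        apply List.map_congr_left
        intro k _
        simp [Function.comp]
        omega

-- A's fold, characterised via pvGrp
theorem foldA (ls : List String) :
    ∀ chunks cur, cur ≠ [] →
      (let st := ls.foldl
        (fun (st : List String × List String) line =>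
          if pvIsHead line then
            (if st.2 ≠ [] then st.1 ++ [PySem.Str.join "\n" st.2] else st.1, [line])
          else (st.1, st.2 ++ [line])) (chunks, cur)
       if st.2 ≠ [] then st.1 ++ [PySem.Str.join "\n" st.2] else st.1)
      = chunks ++ pvGrp cur ls := by
  induction ls with
  | nil => intro chunks cur hcur; simp [pvGrp, hcur]
  | cons l ls ih =>
      intro chunks cur hcur
      by_cases hl : pvIsHead l
      · simp only [List.foldl_cons, hl, if_pos, hcur, ne_eq, not_false_iff]
        rw [ih (chunks ++ [PySem.Str.join "\n" cur]) [l] (by simp)]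
        simp [pvGrp, hl]
      · simp only [List.foldl_cons, hl, Bool.false_eq_true, if_neg, not_false_iff]
        rw [ih chunks (cur ++ [l]) (by simp)]
        simp [pvGrp, hl]

-- the enumerate/filter/map phase of B computes pvHeads (shifted by the start)
theorem enumHeads (ls : List String) :
    ∀ s : Int, ((PySem.List.enumerate ls s).filter (fun p => pvIsHead p.2)).map (·.1)
      = (pvHeads ls).map (fun (k : Nat) => s + (k : Int)) := by
  induction ls with
  | nil => intro s; simp [PySem.List.enumerate_nil, pvHeads]
  | cons l ls ih =>
      intro s
      rw [PySem.List.enumerate_cons]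
      by_cases hl : pvIsHead l
      · simp only [List.filter_cons, hl, if_pos, List.map_cons, ih (s + 1), pvHeads,
          List.singleton_append, List.map_map]
        congr 1
        · simp
        · apply List.map_congr_left
          intro k _
          simp [Function.comp]
          ring
      · simp only [List.filter_cons, hl, Bool.false_eq_true, if_neg, not_false_iff,
          ih (s + 1), pvHeads, List.nil_append, List.map_map]
        apply List.map_congr_left
        intro k _
        simp [Function.comp]
        ring

-- the zip/slice phase of B computes pvSegs
theorem zipSegs (lines : List String) :
    ∀ bs : List Nat, (∀ b ∈ bs, b ≤ lines.length) →
      ((((bs.map (fun (k : Nat) => (k : Int))) ++ [(lines.length : Int)]).zip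
        (((bs.map (fun (k : Nat) => (k : Int))) ++ [(lines.length : Int)]).tail)).map
        (fun p => PySem.Str.join "\n" (PySem.List.slice lines (some p.1) (some p.2))))
      = pvSegs lines bs
  | [], _ => by simp [pvSegs]
  | [s], hb => by
      simp only [List.map_cons, List.map_nil, List.nil_append, List.cons_append,
        List.tail_cons, List.zip_cons_cons, List.zip_nil_right, List.map_cons, List.map_nil,
        pvSegs]
      rw [PySem.List.slice_natCast]
      congr 2
      exact List.take_of_length_le (by rw [List.length_drop])
  | s :: e :: bs, hb => by
      have ih := zipSegs lines (e :: bs) (by intro b h; exact hb b (List.mem_cons_of_mem _ h))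
      simp only [List.map_cons, List.cons_append, List.tail_cons, List.zip_cons_cons,
        List.map_cons, pvSegs] at ih ⊢
      rw [PySem.List.slice_natCast, ih]

theorem main_eq (text : String) : do_chunk_py text = do_chunk_py_alt text := by
  unfold do_chunk_py do_chunk_py_alt
  cases h : PySem.Str.splitlines text with
  | nil => simp
  | cons l ls =>
      simp only [List.foldl_cons, ne_eq, not_true_eq_false, if_neg, not_false_iff,
        reduceCtorEq]
      -- A side: the first line always leaves the state ([], [l])
      have hstate : ((if pvIsHead l = true then (([] : List String), [l])
          else (([] : List String), ([] : List String) ++ [l])) : List String × List String)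
          = (([] : List String), [l]) := by
        by_cases hl : pvIsHead l <;> simp [hl]
      rw [hstate]
      have hA := foldA ls [] [l] (by simp)
      simp only [List.nil_append] at hA
      rw [hA]
      -- B side
      have hheads := enumHeads (l :: ls) 0
      have hcast : ((pvHeads (l :: ls)).map (fun (k : Nat) => (0 : Int) + (k : Int)))
          = (pvHeads (l :: ls)).map (fun (k : Nat) => (k : Int)) := by
        apply List.map_congr_left; intro k _; simp
      rw [hheads, hcast]
      have hbounds : (if (pvHeads (l :: ls)).map (fun (k : Nat) => (k : Int)) = []
              ∨ ((pvHeads (l :: ls)).map (fun (k : Nat) => (k : Int))).head? ≠ some 0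
            then 0 :: (pvHeads (l :: ls)).map (fun (k : Nat) => (k : Int))
            else (pvHeads (l :: ls)).map (fun (k : Nat) => (k : Int)))
          = (0 :: (pvHeads ls).map (· + 1)).map (fun (k : Nat) => (k : Int)) := by
        by_cases hl : pvIsHead l
        · have hh : pvHeads (l :: ls) = 0 :: (pvHeads ls).map (· + 1) := by
            simp [pvHeads, hl]
          rw [hh]
          simp
        · have hh : pvHeads (l :: ls) = (pvHeads ls).map (· + 1) := by
            simp [pvHeads, hl]
          rw [hh]
          cases hps : pvHeads ls with
          | nil => simp
          | cons k t =>
              simp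
              omega
      rw [hbounds]
      rw [zipSegs (l :: ls) (0 :: (pvHeads ls).map (· + 1)) ?hb]
      case hb =>
        intro b hbm
        simp at hbm
        rcases hbm with rfl | ⟨j, hj, rfl⟩
        · simp
        · have := pvHeads_lt ls j hj
          simp
          omega
      have hG := pvGrp_eq_pvSegs ls [l] (by simp)
      simp only [List.singleton_append, List.length_singleton] at hG
      rw [hG]

-- ===== VERDICT (by name: the statement is the Claim_ definition above) =====
theorem do_chunk_py_spec : Claim_equal_do_chunk_py := by
  intro text _
  show do_chunk_py text = do_chunk_py_alt text
  exact main_eq text
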